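-- pv_equiv track=rewrite | github.com/furuhama/advent_of_code | day2/check_sum.py | check_divisible_nums
-- ===== SOURCE A (Python) =====
-- def check_divisible_nums(l):
--     result = 0
--     for i in range(len(l)):
--         for j in range(len(l)):
--             if i == j:
--                 next
--             if l[j] % l[i] == 0 and l[j] // l[i] > result:
--                 result = l[j] // l[i]
--     return result
-- ===== SOURCE B (Python) =====
-- def check_divisible_nums(l):
--     # For each value b, enumerate divisors of |b| up to sqrt(|b|); a present
--     # divisor a of b (any sign) yields candidate quotient b // a.
--     s = set(l)
--     best = 0
--     for b in s:
--         ab = b if b >= 0 else -b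
--         d = 1
--         while d * d <= ab:
--             if ab % d == 0:
--                 for a in (d, -d, ab // d, -(ab // d)):
--                     if a in s:
--                         q = b // a
--                         if q > best:
--                             best = q
--             d += 1
--     return best
-- ===== Notes on version B (the rewrite author's own statement) =====
-- stated objective: faster
-- what changed: A scans all O(n^2) index pairs; B builds the set of values once and, for each value b, enumerates divisors of |b| up to sqrt(|b|), checking set membership of each divisor (of either sign), so the result is a max over divisor candidates instead of over all pairs.
import Mathlib
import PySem

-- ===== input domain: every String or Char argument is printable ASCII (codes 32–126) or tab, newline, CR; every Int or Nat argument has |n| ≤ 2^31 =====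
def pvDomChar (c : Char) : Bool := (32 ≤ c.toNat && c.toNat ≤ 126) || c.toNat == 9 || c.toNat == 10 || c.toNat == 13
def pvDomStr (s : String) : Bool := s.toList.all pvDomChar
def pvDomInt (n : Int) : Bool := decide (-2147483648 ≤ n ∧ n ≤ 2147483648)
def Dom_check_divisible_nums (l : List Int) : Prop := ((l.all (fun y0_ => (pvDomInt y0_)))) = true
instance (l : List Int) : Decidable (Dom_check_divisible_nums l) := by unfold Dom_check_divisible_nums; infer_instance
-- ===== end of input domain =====

-- B replaces A's all-pairs O(n^2) scan by a set of values plus divisor enumeration up to sqrt(|b|) per value (faster in a timing run's measure on large inputs).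


-- ===== PORT A =====
-- Literal port of A. `if i == j: next` in the Python is a no-op (bare `next` is just
-- an expression statement), so nothing is ported for it. Indices i, j are always in
-- range, so pyGetD is exact; `%` and `//` are PySem.Int.mod / floordiv (exact for
-- nonzero divisor; Pre_ excludes lists containing 0, where Python raises).
def check_divisible_nums (l : List Int) : Int :=
  (PySem.List.pyRange 0 (PySem.List.len l) 1).foldl (fun result i =>
    (PySem.List.pyRange 0 (PySem.List.len l) 1).foldl (fun result j =>
      if PySem.Int.mod (PySem.List.pyGetD l j 0) (PySem.List.pyGetD l i 0) = 0 ∧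
         PySem.Int.floordiv (PySem.List.pyGetD l j 0) (PySem.List.pyGetD l i 0) > result
      then PySem.Int.floordiv (PySem.List.pyGetD l j 0) (PySem.List.pyGetD l i 0)
      else result) result) 0

-- ===== PORT B =====
-- Port of Source B's `while d * d <= ab:` loop. The Nat fuel argument only makes the
-- recursion structural (ab.toNat + 1 iterations are always enough, since the loop
-- runs while d * d ≤ ab with d ≥ 1 increasing); it does not alter the computation.
def altDivisorLoop (s : PySem.Set Int) (b ab : Int) : Nat → Int → Int → Int
  | 0, _d, best => best
  | fuel + 1, d, best =>
    if d * d ≤ ab then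
      altDivisorLoop s b ab fuel (d + 1)
        (if PySem.Int.mod ab d = 0 then
          [d, -d, PySem.Int.floordiv ab d, -(PySem.Int.floordiv ab d)].foldl
            (fun best a =>
              if PySem.Set.contains s a then
                (if PySem.Int.floordiv b a > best then PySem.Int.floordiv b a else best)
              else best) best
         else best)
    else best

def check_divisible_nums_alt (l : List Int) : Int :=
  let s := PySem.Set.ofList l
  s.foldl (fun best b =>
    let ab := if b ≥ 0 then b else -b
    altDivisorLoop s b ab (ab.toNat + 1) 1 best) 0

-- ===== PRECONDITION & SPEC =====
-- Pre_ excludes exactly the inputs where A raises ZeroDivisionError: lists containing 0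
-- (every element is used as a divisor in the inner loop).
def Pre_check_divisible_nums (l : List Int) : Prop := (0 : Int) ∉ l
instance (l : List Int) : Decidable (Pre_check_divisible_nums l) := by
  unfold Pre_check_divisible_nums; infer_instance

def pvWitness_check_divisible_nums : List Int := [2, 1, -4]

def Spec_check_divisible_nums (l : List Int) (out : Int) : Prop := out = check_divisible_nums_alt l
instance (l : List Int) (out : Int) : Decidable (Spec_check_divisible_nums l out) := by
  unfold Spec_check_divisible_nums; infer_instance

-- ===== CLAIM (what is proved, stated in full; the proofs are below) =====
def Claim_equal_check_divisible_nums : Prop := ∀ (l : List Int), Dom_check_divisible_nums l → Pre_check_divisible_nums l → Spec_check_divisible_nums l (check_divisible_nums l)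


-- ===== LEMMAS AND PROOFS =====

-- The candidate quotients both programs maximise over.
def pvGood (l : List Int) (q : Int) : Prop :=
  ∃ x ∈ l, ∃ y ∈ l, PySem.Int.mod y x = 0 ∧ q = PySem.Int.floordiv y x

-- generic fold facts for "relax" loops over an Int accumulator
lemma pv_foldl_ge {α : Type} (g : Int → α → Int) (cs : List α)
    (h : ∀ r : Int, ∀ c ∈ cs, r ≤ g r c) (r : Int) : r ≤ cs.foldl g r := by
  induction cs generalizing r with
  | nil => simp
  | cons c cs ih =>
    simp only [List.foldl_cons]
    exact le_trans (h r c (by simp)) (ih (fun r c hc => h r c (by simp [hc])) _)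

lemma pv_foldl_inv {α : Type} (g : Int → α → Int) (Q : Int → Prop) (cs : List α)
    (h : ∀ r : Int, ∀ c ∈ cs, g r c = r ∨ Q (g r c)) (r : Int) :
    cs.foldl g r = r ∨ Q (cs.foldl g r) := by
  induction cs generalizing r with
  | nil => simp
  | cons c cs ih =>
    simp only [List.foldl_cons]
    rcases h r c (by simp) with h1 | h1
    · rw [h1]; exact ih (fun r c hc => h r c (by simp [hc])) r
    · rcases ih (fun r c hc => h r c (by simp [hc])) (g r c) with h2 | h2
      · rw [h2]; exact Or.inr h1
      · exact Or.inr h2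

lemma pv_foldl_delivers {α : Type} (g : Int → α → Int) (cs : List α) (q : Int)
    (hmono : ∀ r : Int, ∀ c ∈ cs, r ≤ g r c) (c0 : α) (hc0 : c0 ∈ cs)
    (hq : ∀ r : Int, q ≤ g r c0) (r : Int) : q ≤ cs.foldl g r := by
  induction cs generalizing r with
  | nil => cases hc0
  | cons c cs ih =>
    simp only [List.foldl_cons]
    rcases List.mem_cons.1 hc0 with h1 | h1
    · subst h1
      exact le_trans (hq r) (pv_foldl_ge g cs (fun r c hc => hmono r c (by simp [hc])) _)
    · exact ih (fun r c hc => hmono r c (by simp [hc])) h1 _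

-- ===== A-side characterisation =====

lemma pv_mem_get (l : List Int) (i : Int)
    (hi : i ∈ PySem.List.pyRange 0 (PySem.List.len l) 1) : PySem.List.pyGetD l i 0 ∈ l := by
  rw [PySem.List.mem_pyRange_one] at hi
  simp only [PySem.List.len_eq] at hi
  have hin : PySem.Raise.InRange l.length i := by unfold PySem.Raise.InRange; omega
  exact PySem.List.pyGetD_mem l 0 hin

lemma pvA_ge0 (l : List Int) : 0 ≤ check_divisible_nums l := by
  unfold check_divisible_nums
  apply pv_foldl_ge
  intro r i _
  apply pv_foldl_ge
  intro r' j _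
  dsimp only
  split_ifs with h
  · exact le_of_lt h.2
  · exact le_refl _

lemma pvA_mem (l : List Int) : check_divisible_nums l = 0 ∨ pvGood l (check_divisible_nums l) := by
  unfold check_divisible_nums
  apply pv_foldl_inv _ (pvGood l)
  intro r i hi
  apply pv_foldl_inv
  intro r' j hj
  dsimp only
  split_ifs with h
  · exact Or.inr ⟨_, pv_mem_get l i hi, _, pv_mem_get l j hj, h.1, rfl⟩
  · exact Or.inl rfl

lemma pvA_ub (l : List Int) (x y : Int) (hx : x ∈ l) (hy : y ∈ l)
    (hmod : PySem.Int.mod y x = 0) : PySem.Int.floordiv y x ≤ check_divisible_nums l := by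
  obtain ⟨ix, hix, hxe⟩ := List.mem_iff_getElem.1 hx
  obtain ⟨iy, hiy, hye⟩ := List.mem_iff_getElem.1 hy
  have hgx : PySem.List.pyGetD l (ix : Int) 0 = x := by
    rw [PySem.List.pyGetD_natCast]; rw [List.getD_eq_getElem l 0 hix]; exact hxe
  have hgy : PySem.List.pyGetD l (iy : Int) 0 = y := by
    rw [PySem.List.pyGetD_natCast]; rw [List.getD_eq_getElem l 0 hiy]; exact hye
  unfold check_divisible_nums
  apply pv_foldl_delivers _ _ _ ?mono (ix : Int) ?memi ?hq
  case mono =>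
    intro r i _
    apply pv_foldl_ge
    intro r' j _
    dsimp only
    split_ifs with h
    · exact le_of_lt h.2
    · exact le_refl _
  case memi =>
    rw [PySem.List.mem_pyRange_one]
    simp only [PySem.List.len_eq]
    omega
  case hq =>
    intro r
    apply pv_foldl_delivers _ _ _ ?mono2 (iy : Int) ?memj ?hq2
    case mono2 =>
      intro r' j _
      dsimp only
      split_ifs with h
      · exact le_of_lt h.2
      · exact le_refl _
    case memj =>
      rw [PySem.List.mem_pyRange_one]
      simp only [PySem.List.len_eq]
      omega
    case hq2 =>
      intro r'
      dsimp only
      rw [hgx, hgy]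
      split_ifs with h
      · exact le_refl _
      · simp only [hmod, true_and, not_lt] at h
        exact h

-- ===== B-side characterisation =====

lemma pvAlt_eq (l : List Int) : check_divisible_nums_alt l =
    (PySem.Set.ofList l).foldl (fun best b =>
      altDivisorLoop (PySem.Set.ofList l) b (if b ≥ 0 then b else -b)
        ((if b ≥ 0 then b else -b).toNat + 1) 1 best) 0 := rfl

lemma pvLoop_ge (s : PySem.Set Int) (b ab : Int) :
    ∀ (fuel : Nat) (d best : Int), best ≤ altDivisorLoop s b ab fuel d best := by
  intro fuel
  induction fuel with
  | zero => intro d best; exact le_refl _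
  | succ n ih =>
    intro d best
    rw [altDivisorLoop]
    split_ifs with h hm
    · refine le_trans ?_ (ih (d + 1) _)
      apply pv_foldl_ge
      intro r a _
      dsimp only
      split_ifs with h1 h2
      · exact le_of_lt h2
      · exact le_refl _
      · exact le_refl _
    · exact ih (d + 1) best
    · exact le_refl _

lemma pvLoop_mem (l : List Int) (s : PySem.Set Int) (b ab : Int)
    (hb : b ∈ l) (hs : ∀ a : Int, PySem.Set.contains s a = true → a ∈ l)
    (hdvd : ∀ a : Int, a ∣ ab → a ∣ b) :
    ∀ (fuel : Nat) (d best : Int), 1 ≤ d →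
      altDivisorLoop s b ab fuel d best = best ∨ pvGood l (altDivisorLoop s b ab fuel d best) := by
  intro fuel
  induction fuel with
  | zero => intro d best _; exact Or.inl rfl
  | succ n ih =>
    intro d best hd
    rw [altDivisorLoop]
    split_ifs with h hm
    · rcases ih (d + 1) _ (by omega) with h1 | h1
      · rw [h1]
        apply pv_foldl_inv
        intro r a ha
        dsimp only
        split_ifs with hc hgt
        · refine Or.inr ⟨a, hs a hc, b, hb, ?_, rfl⟩
          apply (PySem.Int.mod_eq_zero_iff_dvd b a).2
          apply hdvd
          have hd0 : d ∣ ab := (PySem.Int.mod_eq_zero_iff_dvd ab d).1 hm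
          have hq : PySem.Int.floordiv ab d ∣ ab := by
            obtain ⟨c, hc'⟩ := hd0
            rw [PySem.Int.floordiv_eq_ediv_of_pos (by omega), hc',
              Int.mul_ediv_cancel_left _ (by omega : d ≠ 0)]
            exact dvd_mul_left c d
          simp only [List.mem_cons, List.not_mem_nil, or_false] at ha
          rcases ha with rfl | rfl | rfl | rfl
          · exact hd0
          · exact (neg_dvd).2 hd0
          · exact hq
          · exact (neg_dvd).2 hq
        · exact Or.inl rfl
        · exact Or.inl rfl
      · exact Or.inr h1
    · exact ih (d + 1) best (by omega)
    · exact Or.inl rfl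

lemma pvLoop_ub (s : PySem.Set Int) (b ab d0 a : Int)
    (hsq : d0 * d0 ≤ ab) (hm0 : PySem.Int.mod ab d0 = 0)
    (ha : a = d0 ∨ a = -d0 ∨ a = PySem.Int.floordiv ab d0 ∨ a = -(PySem.Int.floordiv ab d0))
    (hc : PySem.Set.contains s a = true) :
    ∀ (fuel : Nat) (d best : Int), 1 ≤ d → d ≤ d0 → (d0 - d).toNat < fuel →
      PySem.Int.floordiv b a ≤ altDivisorLoop s b ab fuel d best := by
  intro fuel
  induction fuel with
  | zero => intro d best _ _ hf; omega
  | succ n ih =>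
    intro d best hd hdd hf
    have hguard : d * d ≤ ab :=
      le_trans (mul_le_mul hdd hdd (by omega) (by omega)) hsq
    rw [altDivisorLoop]
    rw [if_pos hguard]
    rcases eq_or_lt_of_le hdd with hde | hlt
    · subst hde
      refine le_trans ?_ (pvLoop_ge s b ab n (d + 1) _)
      rw [if_pos hm0]
      apply pv_foldl_delivers _ _ _ ?m3 a ?mem3 ?hq3
      case m3 =>
        intro r c _
        dsimp only
        split_ifs with h1 h2
        · exact le_of_lt h2
        · exact le_refl _
        · exact le_refl _
      case mem3 =>
        rcases ha with rfl | rfl | rfl | rfl <;> simp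
      case hq3 =>
        intro r
        dsimp only
        rw [if_pos hc]
        split_ifs with h1
        · exact le_refl _
        · omega
    · exact ih (d + 1) _ (by omega) (by omega) (by omega)

lemma pvB_ge0 (l : List Int) : 0 ≤ check_divisible_nums_alt l := by
  rw [pvAlt_eq]
  apply pv_foldl_ge
  intro r b _
  exact pvLoop_ge _ _ _ _ _ _

lemma pvB_mem (l : List Int) : check_divisible_nums_alt l = 0 ∨ pvGood l (check_divisible_nums_alt l) := by
  rw [pvAlt_eq]
  apply pv_foldl_inv
  intro r b hbmem
  apply pvLoop_mem l _ _ _ ((PySem.Set.mem_ofList _ _).1 hbmem) ?hs ?hdvd _ _ _ (by omega)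
  case hs =>
    intro a hca
    exact (PySem.Set.mem_ofList _ _).1 ((PySem.Set.contains_iff _ _).1 hca)
  case hdvd =>
    intro a hda
    by_cases hb0 : b ≥ 0
    · rwa [if_pos hb0] at hda
    · rw [if_neg hb0] at hda
      exact (Int.dvd_neg).1 hda

-- divisor coverage: a nonzero divisor x of ab > 0 is d0 or ab // d0 (up to sign)
-- for some divisor d0 with d0 * d0 ≤ ab
lemma pvCover (x ab : Int) (hx : x ≠ 0) (hab : 0 < ab) (hdvd : x ∣ ab) :
    ∃ d0 : Int, 1 ≤ d0 ∧ d0 ≤ ab ∧ d0 * d0 ≤ ab ∧ PySem.Int.mod ab d0 = 0 ∧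
      (x = d0 ∨ x = -d0 ∨ x = PySem.Int.floordiv ab d0 ∨ x = -(PySem.Int.floordiv ab d0)) := by
  have hm : |x| ∣ ab := (abs_dvd x ab).2 hdvd
  have hm1 : 1 ≤ |x| := by have := abs_pos.2 hx; omega
  have hmle : |x| ≤ ab := Int.le_of_dvd hab hm
  obtain ⟨k, hk⟩ := hm
  have hk1 : 1 ≤ k := by nlinarith
  by_cases hcase : |x| * |x| ≤ ab
  · refine ⟨|x|, hm1, hmle, hcase, (PySem.Int.mod_eq_zero_iff_dvd _ _).2 ((abs_dvd x ab).2 hdvd), ?_⟩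
    rcases abs_choice x with h | h
    · exact Or.inl (by omega)
    · exact Or.inr (Or.inl (by omega))
  · have hklt : k < |x| := by nlinarith
    have hkk : k * k ≤ ab := by nlinarith
    have hkle : k ≤ ab := by nlinarith
    have hkd : PySem.Int.floordiv ab k = |x| := by
      rw [PySem.Int.floordiv_eq_ediv_of_pos (by omega), hk,
        Int.mul_ediv_cancel _ (by omega : k ≠ 0)]
    refine ⟨k, hk1, hkle, hkk, (PySem.Int.mod_eq_zero_iff_dvd _ _).2 ⟨|x|, by rw [hk]; ring⟩, ?_⟩
    rcases abs_choice x with h | h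
    · exact Or.inr (Or.inr (Or.inl (by omega)))
    · exact Or.inr (Or.inr (Or.inr (by omega)))

lemma pvB_ub (l : List Int) (hl : (0:Int) ∉ l) (x y : Int) (hx : x ∈ l) (hy : y ∈ l)
    (hmod : PySem.Int.mod y x = 0) : PySem.Int.floordiv y x ≤ check_divisible_nums_alt l := by
  have hx0 : x ≠ 0 := fun h => hl (h ▸ hx)
  have hy0 : y ≠ 0 := fun h => hl (h ▸ hy)
  rw [pvAlt_eq]
  apply pv_foldl_delivers _ _ _ ?mono y ?mem ?hq
  case mono =>
    intro r c _
    exact pvLoop_ge _ _ _ _ _ _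
  case mem => exact (PySem.Set.mem_ofList _ _).2 hy
  case hq =>
    intro r
    have hab : 0 < (if y ≥ 0 then y else -y) := by split_ifs <;> omega
    have hdab : x ∣ (if y ≥ 0 then y else -y) := by
      have hxy : x ∣ y := (PySem.Int.mod_eq_zero_iff_dvd y x).1 hmod
      split_ifs
      · exact hxy
      · exact (Int.dvd_neg).2 hxy
    obtain ⟨d0, hd0, hdle, hsq, hm0, hwhich⟩ := pvCover x _ hx0 hab hdab
    exact pvLoop_ub _ _ _ d0 x hsq hm0 hwhich
      ((PySem.Set.contains_iff _ _).2 ((PySem.Set.mem_ofList _ _).2 hx)) _ _ _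
      (by omega) hd0 (by omega)

-- ===== VERDICT (by name: the statement is the Claim_ definition above) =====
theorem check_divisible_nums_spec : Claim_equal_check_divisible_nums := by
  intro l _ hpre
  unfold Spec_check_divisible_nums
  apply le_antisymm
  · rcases pvA_mem l with h | ⟨x, hx, y, hy, hmod, hq⟩
    · rw [h]; exact pvB_ge0 l
    · rw [hq]; exact pvB_ub l hpre x y hx hy hmod
  · rcases pvB_mem l with h | ⟨x, hx, y, hy, hmod, hq⟩
    · rw [h]; exact pvA_ge0 l
    · rw [hq]; exact pvA_ub l x y hx hy hmod
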